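-- pv_equiv track=rewrite | github.com/Akellags/askGuru-SQL | custom_oracle_sqlcoder/_preprocessing_sqlcoder.py | extract_question_and_schema
-- ===== SOURCE A (Python) =====
-- def extract_question_and_schema(user_content: str) -> tuple:
--     """
--     Extract question and schema from askGuru user prompt.
--     """
--     lines = user_content.split('\n')
--
--     schema_lines = []
--     question_lines = []
--     in_schema = False
--     in_question = False
--
--     for line in lines:
--         if '[User Question]' in line:
--             in_question = True
--             in_schema = False
--             continue
--
--         if in_question:
--             if line.strip():
--                 question_lines.append(line)
--         elif line.startswith('# ') or line.startswith('- '):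
--             in_schema = True
--             schema_lines.append(line)
--         elif in_schema:
--             schema_lines.append(line)
--
--     question = ' '.join(question_lines).strip()
--     schema = '\n'.join(schema_lines).strip()
--
--     return question, schema
-- ===== SOURCE B (Python) =====
-- def extract_question_and_schema(user_content: str) -> tuple:
--     """
--     Extract question and schema from askGuru user prompt.
--     """
--     lines = user_content.split('\n')
--     idx = next((i for i, l in enumerate(lines) if '[User Question]' in l), None)
--     before = lines if idx is None else lines[:idx]
--     after = [] if idx is None else lines[idx + 1:]
--     start = next((i for i, l in enumerate(before)
--                   if l.startswith('# ') or l.startswith('- ')), None)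
--     schema_lines = [] if start is None else before[start:]
--     question_lines = [l for l in after if l.strip() and '[User Question]' not in l]
--     return ' '.join(question_lines).strip(), '\n'.join(schema_lines).strip()
-- ===== Notes on version B (the rewrite author's own statement) =====
-- stated objective: simpler
-- what changed: A's single-pass four-flag state machine (in_schema/in_question toggled per line) is replaced by index-based decomposition: find the marker line's index, slice the lines into before/after, take the schema slice from the first schema-prefix line of the before part, and filter the question lines out of the after part.
import Mathlib
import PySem

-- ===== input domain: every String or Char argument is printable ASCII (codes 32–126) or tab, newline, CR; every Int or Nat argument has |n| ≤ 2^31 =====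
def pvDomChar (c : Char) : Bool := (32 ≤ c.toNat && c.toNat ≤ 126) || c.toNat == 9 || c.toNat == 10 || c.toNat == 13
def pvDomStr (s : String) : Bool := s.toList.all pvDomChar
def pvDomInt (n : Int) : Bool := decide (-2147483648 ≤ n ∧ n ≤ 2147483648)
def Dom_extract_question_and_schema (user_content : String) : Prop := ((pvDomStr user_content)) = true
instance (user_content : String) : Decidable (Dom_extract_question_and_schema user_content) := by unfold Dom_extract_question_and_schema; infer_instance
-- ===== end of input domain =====

-- B replaces A's four-flag state machine by index-based decomposition: locate the marker line,
-- slice before/after, find the first schema-start line, and filter the question lines (objective: simpler).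

-- shared text predicates (both Python programs test these same conditions on a line)
def pvIsMarker (l : String) : Bool := PySem.Str.isIn "[User Question]" l
def pvIsSchemaStart (l : String) : Bool :=
  PySem.Str.startswith l "# " || PySem.Str.startswith l "- "

-- ===== PORT A =====
-- the body of A's for-loop, on the state (schema_lines, question_lines, in_schema, in_question)
def pvStepA (acc : List String × List String × Bool × Bool) (line : String) :
    List String × List String × Bool × Bool :=
  let (schema_lines, question_lines, in_schema, in_question) := acc
  if pvIsMarker line then (schema_lines, question_lines, false, true)
  else if in_question then
    (if PySem.Str.strip line ≠ "" then (schema_lines, question_lines ++ [line], in_schema, in_question)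
     else acc)
  else if pvIsSchemaStart line then (schema_lines ++ [line], question_lines, true, in_question)
  else if in_schema then (schema_lines ++ [line], question_lines, in_schema, in_question)
  else acc

def extract_question_and_schema (user_content : String) : String × String :=
  let lines := (PySem.Str.split? user_content "\n").getD []
  let r := lines.foldl pvStepA ([], [], false, false)
  (PySem.Str.strip (PySem.Str.join " " r.2.1), PySem.Str.strip (PySem.Str.join "\n" r.1))

-- ===== PORT B =====
def extract_question_and_schema_alt (user_content : String) : String × String :=
  let lines := (PySem.Str.split? user_content "\n").getD []
  let idx? := lines.findIdx? pvIsMarker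
  let before := match idx? with | none => lines | some i => lines.take i
  let after : List String := match idx? with | none => [] | some i => lines.drop (i + 1)
  let start? := before.findIdx? pvIsSchemaStart
  let schema_lines : List String := match start? with | none => [] | some j => before.drop j
  let question_lines := after.filter (fun l => PySem.Str.strip l ≠ "" && !pvIsMarker l)
  (PySem.Str.strip (PySem.Str.join " " question_lines), PySem.Str.strip (PySem.Str.join "\n" schema_lines))

-- ===== PRECONDITION & SPEC =====
def Spec_extract_question_and_schema (user_content : String) (out : String × String) : Prop := out = extract_question_and_schema_alt user_content
instance (user_content : String) (out : String × String) : Decidable (Spec_extract_question_and_schema user_content out) := by unfold Spec_extract_question_and_schema; infer_instance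

-- ===== CLAIM (what is proved, stated in full; the proofs are below) =====
def Claim_equal_extract_question_and_schema : Prop := ∀ (user_content : String), Dom_extract_question_and_schema user_content → Spec_extract_question_and_schema user_content (extract_question_and_schema user_content)

-- ===== LEMMAS AND PROOFS =====

def pvKeepQ (l : String) : Bool := PySem.Str.strip l ≠ "" && !pvIsMarker l

-- B's specification of the two line lists, as functions of the split lines
def pvSchemaB (ls : List String) : List String :=
  let before := match ls.findIdx? pvIsMarker with | none => ls | some i => ls.take i
  match before.findIdx? pvIsSchemaStart with | none => [] | some j => before.drop j

def pvQuestionB (ls : List String) : List String :=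
  match ls.findIdx? pvIsMarker with
  | none => []
  | some i => (ls.drop (i + 1)).filter pvKeepQ

-- once in_question is set, A only collects question lines
lemma pvLemQ (ls : List String) : ∀ (s q : List String) (b : Bool),
    ∃ b', ls.foldl pvStepA (s, q, b, true) = (s, q ++ ls.filter pvKeepQ, b', true) := by
  induction ls with
  | nil => intro s q b; exact ⟨b, by simp⟩
  | cons l ls ih =>
    intro s q b
    by_cases hm : pvIsMarker l
    · obtain ⟨b', hb'⟩ := ih s q false
      exact ⟨b', by simp [List.foldl_cons, pvStepA, hm, pvKeepQ, hb']⟩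
    · by_cases hs : PySem.Str.strip l = ""
      · obtain ⟨b', hb'⟩ := ih s q b
        exact ⟨b', by simp [List.foldl_cons, pvStepA, hm, hs, pvKeepQ, hb']⟩
      · obtain ⟨b', hb'⟩ := ih s (q ++ [l]) b
        exact ⟨b', by simp [List.foldl_cons, pvStepA, hm, hs, pvKeepQ, hb']⟩

-- once in_schema is set (and not in_question), A appends every line up to the marker
lemma pvLemS (ls : List String) : ∀ (s q : List String),
    (ls.foldl pvStepA (s, q, true, false)).1
        = s ++ (match ls.findIdx? pvIsMarker with | none => ls | some i => ls.take i)
    ∧ (ls.foldl pvStepA (s, q, true, false)).2.1 = q ++ pvQuestionB ls := by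
  induction ls with
  | nil => intro s q; simp [pvQuestionB]
  | cons l ls ih =>
    intro s q
    by_cases hm : pvIsMarker l
    · obtain ⟨b', hb'⟩ := pvLemQ ls s q false
      simp [List.foldl_cons, pvStepA, hm, hb', List.findIdx?_cons, pvQuestionB]
    · have h := ih (s ++ [l]) q
      have hstep : (l :: ls).foldl pvStepA (s, q, true, false)
          = ls.foldl pvStepA (s ++ [l], q, true, false) := by
        by_cases hs : pvIsSchemaStart l <;> simp [List.foldl_cons, pvStepA, hm, hs]
      refine ⟨?_, ?_⟩
      · rw [hstep, h.1]
        cases hfi : ls.findIdx? pvIsMarker <;>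
          simp [List.findIdx?_cons, hm, hfi, List.take_succ_cons]
      · rw [hstep, h.2]
        cases hfi : ls.findIdx? pvIsMarker <;>
          simp [pvQuestionB, List.findIdx?_cons, hm, hfi]

-- the initial phase: nothing collected until a schema-start or the marker
lemma pvLem0 (ls : List String) : ∀ (s q : List String),
    (ls.foldl pvStepA (s, q, false, false)).1 = s ++ pvSchemaB ls
    ∧ (ls.foldl pvStepA (s, q, false, false)).2.1 = q ++ pvQuestionB ls := by
  induction ls with
  | nil => intro s q; simp [pvSchemaB, pvQuestionB]
  | cons l ls ih =>
    intro s q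
    by_cases hm : pvIsMarker l
    · obtain ⟨b', hb'⟩ := pvLemQ ls s q false
      simp [List.foldl_cons, pvStepA, hm, hb', pvSchemaB, pvQuestionB, List.findIdx?_cons]
    · by_cases hs : pvIsSchemaStart l
      · have h := pvLemS ls (s ++ [l]) q
        constructor
        · rw [show (((l :: ls).foldl pvStepA (s, q, false, false))).1
              = ((ls.foldl pvStepA (s ++ [l], q, true, false))).1 by
            simp [List.foldl_cons, pvStepA, hm, hs]]
          rw [h.1]
          cases hfi : ls.findIdx? pvIsMarker <;>
            simp [pvSchemaB, List.findIdx?_cons, hm, hs, hfi, List.take_succ_cons]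
        · rw [show (((l :: ls).foldl pvStepA (s, q, false, false))).2.1
              = ((ls.foldl pvStepA (s ++ [l], q, true, false))).2.1 by
            simp [List.foldl_cons, pvStepA, hm, hs]]
          rw [h.2]
          cases hfi : ls.findIdx? pvIsMarker <;>
            simp [pvQuestionB, List.findIdx?_cons, hm, hfi]
      · have h := ih s q
        have hstep : (l :: ls).foldl pvStepA (s, q, false, false)
            = ls.foldl pvStepA (s, q, false, false) := by
          simp [List.foldl_cons, pvStepA, hm, hs]
        constructor
        · rw [hstep, h.1]
          cases hfi : ls.findIdx? pvIsMarker with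
          | none =>
            cases hfj : ls.findIdx? pvIsSchemaStart <;>
              simp [pvSchemaB, List.findIdx?_cons, hm, hs, hfi, hfj, List.drop_succ_cons]
          | some i =>
            cases hfj : (ls.take i).findIdx? pvIsSchemaStart <;>
              simp [pvSchemaB, List.findIdx?_cons, hm, hs, hfi, hfj,
                List.take_succ_cons, List.drop_succ_cons]
        · rw [hstep, h.2]
          cases hfi : ls.findIdx? pvIsMarker <;>
            simp [pvQuestionB, List.findIdx?_cons, hm, hfi]

-- ===== VERDICT (by name: the statement is the Claim_ definition above) =====
theorem extract_question_and_schema_spec : Claim_equal_extract_question_and_schema := by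
  intro user_content _
  unfold Spec_extract_question_and_schema extract_question_and_schema extract_question_and_schema_alt
  have h := pvLem0 ((PySem.Str.split? user_content "\n").getD []) [] []
  simp only [List.nil_append] at h
  simp only [h.1, h.2, pvSchemaB, pvQuestionB]
  have hk : pvKeepQ = fun l => !decide (PySem.Str.strip l = "") && !pvIsMarker l := by
    funext l; simp [pvKeepQ, decide_not]
  cases hfi : List.findIdx? pvIsMarker ((PySem.Str.split? user_content "\n").getD []) <;>
    simp [hfi, hk]
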